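-- pv_equiv track=rewrite | github.com/BobWang21/algorithm | 9 队列 栈 堆/2 queue.py | max_area_min_sum_product
-- ===== SOURCE A (Python) =====
-- def max_area_min_sum_product(nums):
--     if not nums:
--         return 0
--     nums.append(-1)  # 为了使栈中剩余元素出栈
--     n = len(nums)
--     stack = []
--     total = [0] * n
--     res = 0
--
--     for i, v in enumerate(nums):
--         v = v if v >= 0 else 0
--         total[i] = total[i - 1] + v
--
--         while stack and v < nums[stack[-1]]:
--             j = stack.pop(-1)
--             pre_total = 0
--             if stack:
--                 pre_total = total[stack[-1]]
--             res = max(res, (total[i - 1] - pre_total) * nums[j])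
--         stack.append(i)
--     return res
-- ===== SOURCE B (Python) =====
-- def max_area_min_sum_product(nums):
--     res = 0
--     for i in range(len(nums)):
--         mn = nums[i]
--         s = 0
--         for v in nums[i:]:
--             mn = min(mn, v)
--             s += max(v, 0)
--             res = max(res, mn * s)
--     return res
-- ===== Notes on version B (the rewrite author's own statement) =====
-- stated objective: simpler
-- what changed: Replaces the monotonic-stack + prefix-sum single pass (with its sentinel append and index bookkeeping) by the plain two-loop brute force: for every start index scan right maintaining the running min and the running clamped sum, taking the max of their product; note A mutates its argument (appends -1) while B does not.
import Mathlib
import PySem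

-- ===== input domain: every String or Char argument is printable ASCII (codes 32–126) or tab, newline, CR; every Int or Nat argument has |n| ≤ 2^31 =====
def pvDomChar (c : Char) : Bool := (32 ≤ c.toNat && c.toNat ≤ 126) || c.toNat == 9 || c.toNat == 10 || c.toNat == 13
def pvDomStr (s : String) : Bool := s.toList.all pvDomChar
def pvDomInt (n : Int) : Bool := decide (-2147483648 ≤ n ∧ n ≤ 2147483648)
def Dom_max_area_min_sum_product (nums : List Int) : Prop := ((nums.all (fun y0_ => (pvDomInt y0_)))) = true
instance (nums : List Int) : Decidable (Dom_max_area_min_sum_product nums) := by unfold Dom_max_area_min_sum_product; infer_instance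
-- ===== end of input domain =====

-- B replaces A's monotonic-stack/prefix-sum single pass by the plain O(n^2) two-loop brute
-- force (simpler, not faster); equivalence is about the RETURN value only: Python A mutates
-- its argument (appends -1), Python B does not.

-- ===== PORT A =====
-- While-loop of A ("while stack and v < nums[stack[-1]]"): the stack holds loop-counter
-- values, hence Nat and always in range of ns, so `ns.getD j 0` / `total.getD t 0` read
-- exactly Python's `nums[stack[-1]]` / `total[stack[-1]]`; `total[i-1]` can see i = 0
-- (Python's negative-index wraparound), so it is read with pyGetD.
def aPop (ns total : List Int) (v : Int) (i : Nat) : List Nat → Int → List Nat × Int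
  | [], res => ([], res)
  | j :: rest, res =>
    if v < ns.getD j 0 then
      let preTotal : Int :=
        match rest with
        | [] => 0
        | t :: _ => total.getD t 0
      aPop ns total v i rest
        (max res ((PySem.List.pyGetD total ((i : Int) - 1) 0 - preTotal) * ns.getD j 0))
    else (j :: rest, res)

-- "for i, v in enumerate(nums)": structural recursion over the list with the index counter.
def aMain (ns : List Int) : List Int → Nat → List Nat → List Int → Int → Int
  | [], _, _, _, res => res
  | v :: rem, i, stack, total, res =>
    let v' := if 0 ≤ v then v else 0
    let total' := total.set i (PySem.List.pyGetD total ((i : Int) - 1) 0 + v')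
    let p := aPop ns total' v' i stack res
    aMain ns rem (i + 1) (i :: p.1) total' p.2

def max_area_min_sum_product (nums : List Int) : Int :=
  if nums.isEmpty then 0
  else
    let ns := nums ++ [-1]
    aMain ns ns 0 [] (List.replicate ns.length 0) 0

-- ===== PORT B =====
-- Inner loop "for v in nums[i:]": running min `mn`, running clamped sum `s`, best `res`.
def bInner : List Int → Int → Int → Int → Int
  | [], _, _, res => res
  | v :: rest, mn, s, res =>
    let mn' := min mn v
    let s' := s + max v 0
    bInner rest mn' s' (max res (mn' * s'))

-- Outer loop over all start indices, i.e. over the suffixes of nums.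
def bOuter : List Int → Int → Int
  | [], res => res
  | v :: rest, res => bOuter rest (bInner (v :: rest) v 0 res)

def max_area_min_sum_product_alt (nums : List Int) : Int := bOuter nums 0

-- ===== PRECONDITION & SPEC =====
def Spec_max_area_min_sum_product (nums : List Int) (out : Int) : Prop := out = max_area_min_sum_product_alt nums
instance (nums : List Int) (out : Int) : Decidable (Spec_max_area_min_sum_product nums out) := by unfold Spec_max_area_min_sum_product; infer_instance

-- ===== CLAIM (what is proved, stated in full; the proofs are below) =====
def Claim_equal_max_area_min_sum_product : Prop := ∀ (nums : List Int), Dom_max_area_min_sum_product nums → Spec_max_area_min_sum_product nums (max_area_min_sum_product nums)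

-- ===== LEMMAS AND PROOFS =====

-- `idxL ns k` is Python's `ns[k]` for the in-range Nat indices both programs use.
def idxL (ns : List Int) (k : Nat) : Int := ns.getD k 0

-- prefix sums of the clamped values: what A's `total` array holds.
def pfx (ns : List Int) : Nat → Int
  | 0 => 0
  | k + 1 => pfx ns k + max (idxL ns k) 0

-- min of the segment [l, l+c] and clamped sum of the segment [l, l+c].
def segMin (ns : List Int) (l : Nat) : Nat → Int
  | 0 => idxL ns l
  | c + 1 => min (segMin ns l c) (idxL ns (l + c + 1))

def segSum (ns : List Int) (l : Nat) : Nat → Int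
  | 0 => max (idxL ns l) 0
  | c + 1 => segSum ns l c + max (idxL ns (l + c + 1)) 0

def segVal (ns : List Int) (l c : Nat) : Int := segMin ns l c * segSum ns l c

-- "res is 0 or the value of some segment whose indices are all < B"
def SoundRes (ns : List Int) (B : Nat) (r : Int) : Prop :=
  r = 0 ∨ ∃ l c, l + c < B ∧ r = segVal ns l c

-- adjacent-pair invariant of A's stack (b above a): ordered, value-ordered via the clamp,
-- and everything strictly between them is larger than the clamp of the upper value.
def PairP (ns : List Int) (b a : Nat) : Prop :=
  a < b ∧ idxL ns a ≤ max (idxL ns b) 0 ∧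
    ∀ k, a < k → k < b → max (idxL ns b) 0 < idxL ns k

-- full loop invariant of A before processing index i
structure AInv (ns : List Int) (i : Nat) (stack : List Nat) (total : List Int) (res : Int) : Prop where
  lt : ∀ j ∈ stack, j < i
  chain : stack.IsChain (PairP ns)
  bot : ∀ (h : stack ≠ []) (k : Nat), k < stack.getLast h →
          max (idxL ns (stack.getLast h)) 0 < idxL ns k
  shape : (i = 0 ∧ stack = []) ∨ (∃ tl, stack = (i - 1) :: tl ∧ 0 < i)
  mem : ∀ j, j < i → 0 < idxL ns j →
          (∀ k, j < k → k < i → idxL ns j ≤ max (idxL ns k) 0) → j ∈ stack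
  after : ∀ c ∈ stack, ∀ k, c < k → k < i → idxL ns c ≤ max (idxL ns k) 0
  tlen : total.length = ns.length
  ile : i ≤ ns.length
  tval : ∀ k, total.getD k 0 = if k < i then pfx ns (k + 1) else 0
  rnn : 0 ≤ res
  rsound : SoundRes ns (ns.length - 1) res
  rcomp : ∀ l c, l + c < i → 0 < segMin ns l c →
            (∃ k, l + c < k ∧ k < i ∧ idxL ns k < segMin ns l c) →
            segVal ns l c ≤ res

-- ----- small facts -----

lemma clamp_if (v : Int) : (if 0 ≤ v then v else 0) = max v 0 := by
  split <;> omega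

lemma pfx_mono (ns : List Int) {a b : Nat} (h : a ≤ b) : pfx ns a ≤ pfx ns b := by
  induction b with
  | zero => have : a = 0 := by omega
            subst this; exact le_refl _
  | succ b ih =>
    rcases Nat.lt_or_ge a (b + 1) with h' | h'
    · have := ih (by omega)
      simp only [pfx]; have := le_max_right (idxL ns b) 0; omega
    · have : a = b + 1 := by omega
      subst this; exact le_refl _

lemma segSum_nonneg (ns : List Int) (l c : Nat) : 0 ≤ segSum ns l c := by
  induction c with
  | zero => simp [segSum]
  | succ c ih => simp only [segSum]; have := le_max_right (idxL ns (l + c + 1)) 0; omega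

lemma segSum_eq_pfx (ns : List Int) (l c : Nat) :
    segSum ns l c = pfx ns (l + c + 1) - pfx ns l := by
  induction c with
  | zero => simp [segSum, pfx]
  | succ c ih => simp only [segSum, ih]; have : l + (c+1) + 1 = (l + c + 1) + 1 := by omega
                 rw [this]; simp only [pfx]; ring

lemma segMin_le (ns : List Int) (l c : Nat) :
    ∀ k, l ≤ k → k ≤ l + c → segMin ns l c ≤ idxL ns k := by
  induction c with
  | zero => intro k h1 h2; have : k = l := by omega
            subst this; simp [segMin]
  | succ c ih =>
    intro k h1 h2
    rcases Nat.lt_or_ge k (l + c + 1) with h' | h'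
    · have := ih k h1 (by omega)
      simp only [segMin]; exact le_trans (min_le_left _ _) this
    · have : k = l + c + 1 := by omega
      subst this; simp only [segMin]; exact min_le_right _ _

lemma le_segMin (ns : List Int) (l c : Nat) (m : Int)
    (h : ∀ k, l ≤ k → k ≤ l + c → m ≤ idxL ns k) : m ≤ segMin ns l c := by
  induction c with
  | zero => simpa [segMin] using h l (le_refl _) (by omega)
  | succ c ih =>
    simp only [segMin, le_min_iff]
    exact ⟨ih (fun k h1 h2 => h k h1 (by omega)), h (l + c + 1) (by omega) (by omega)⟩

-- first position of the minimum of [l, l+c]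
lemma segMin_argfirst (ns : List Int) (l c : Nat) :
    ∃ j, l ≤ j ∧ j ≤ l + c ∧ idxL ns j = segMin ns l c ∧
      ∀ k, l ≤ k → k < j → segMin ns l c < idxL ns k := by
  induction c with
  | zero => exact ⟨l, le_refl _, by omega, rfl, fun k h1 h2 => by omega⟩
  | succ c ih =>
    obtain ⟨j, hj1, hj2, hj3, hj4⟩ := ih
    rcases le_or_gt (segMin ns l c) (idxL ns (l + c + 1)) with h | h
    · refine ⟨j, hj1, by omega, ?_, ?_⟩
      · simp only [segMin]; omega
      · intro k h1 h2
        have := hj4 k h1 h2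
        simp only [segMin]; omega
    · refine ⟨l + c + 1, by omega, by omega, ?_, ?_⟩
      · simp only [segMin]; omega
      · intro k h1 h2
        have := segMin_le ns l c k h1 (by omega)
        simp only [segMin]; omega

lemma segMin_eq (ns : List Int) (l c j : Nat) (h1 : l ≤ j) (h2 : j ≤ l + c)
    (hj : ∀ k, l ≤ k → k ≤ l + c → idxL ns j ≤ idxL ns k) :
    segMin ns l c = idxL ns j :=
  le_antisymm (segMin_le ns l c j h1 h2) (le_segMin ns l c _ hj)

-- agreement of the indexed views of nums and nums ++ [-1]
lemma idxL_append (nums : List Int) (k : Nat) (h : k < nums.length) :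
    idxL (nums ++ [-1]) k = idxL nums k := by
  simp [idxL, List.getD, List.getElem?_append_left h]

lemma idxL_sentinel (nums : List Int) : idxL (nums ++ [-1]) nums.length = -1 := by
  simp [idxL, List.getD]

lemma segMin_append (nums : List Int) (l c : Nat) (h : l + c < nums.length) :
    segMin (nums ++ [-1]) l c = segMin nums l c := by
  induction c with
  | zero => simp [segMin, idxL_append nums l (by omega)]
  | succ c ih => simp [segMin, ih (by omega), idxL_append nums (l + c + 1) (by omega)]

lemma segSum_append (nums : List Int) (l c : Nat) (h : l + c < nums.length) :
    segSum (nums ++ [-1]) l c = segSum nums l c := by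
  induction c with
  | zero => simp [segSum, idxL_append nums l (by omega)]
  | succ c ih => simp [segSum, ih (by omega), idxL_append nums (l + c + 1) (by omega)]

lemma segVal_append (nums : List Int) (l c : Nat) (h : l + c < nums.length) :
    segVal (nums ++ [-1]) l c = segVal nums l c := by
  simp [segVal, segMin_append nums l c h, segSum_append nums l c h]

-- every element of a stack satisfying the chain invariant is ≤ max(top) 0
lemma chain_le_top (ns : List Int) (t : Nat) (l : List Nat)
    (h : (t :: l).IsChain (PairP ns)) :
    ∀ a ∈ t :: l, idxL ns a ≤ max (idxL ns t) 0 := by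
  induction l generalizing t with
  | nil => intro a ha; simp at ha; subst ha; exact le_max_left _ _
  | cons t' l ih =>
    intro a ha
    rcases List.isChain_cons_cons.mp h with ⟨hp, h'⟩
    rcases List.mem_cons.mp ha with rfl | ha
    · exact le_max_left _ _
    · have := ih t' h' a ha
      have h1 : idxL ns t' ≤ max (idxL ns t) 0 := hp.2.1
      have : max (idxL ns t') 0 ≤ max (idxL ns t) 0 := by omega
      omega

lemma idxL_eq_getElem (ns : List Int) (k : Nat) (h : k < ns.length) :
    idxL ns k = ns[k] := by
  simp [idxL, List.getD, List.getElem?_eq_getElem h]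

-- ----- characterization of B -----

lemma bInner_props (nums : List Int) :
    ∀ d c l r, nums.length - (l + c + 1) = d → l + c < nums.length →
      (r ≤ bInner (nums.drop (l + c + 1)) (segMin nums l c) (segSum nums l c) r) ∧
      (∀ c', c < c' → l + c' < nums.length →
        segVal nums l c' ≤ bInner (nums.drop (l + c + 1)) (segMin nums l c) (segSum nums l c) r) ∧
      (bInner (nums.drop (l + c + 1)) (segMin nums l c) (segSum nums l c) r = r ∨
        ∃ c', c < c' ∧ l + c' < nums.length ∧
          bInner (nums.drop (l + c + 1)) (segMin nums l c) (segSum nums l c) r = segVal nums l c') := by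
  intro d
  induction d with
  | zero =>
    intro c l r hd _
    have hnil : nums.drop (l + c + 1) = [] := List.drop_eq_nil_of_le (by omega)
    rw [hnil]
    refine ⟨le_refl _, ?_, Or.inl rfl⟩
    intro c' hc' hlen
    omega
  | succ d ih =>
    intro c l r hd hlen
    have hlt : l + c + 1 < nums.length := by omega
    have hdrop : nums.drop (l + c + 1) = nums[l + c + 1] :: nums.drop (l + c + 2) :=
      List.drop_eq_getElem_cons hlt
    have hidx : idxL nums (l + c + 1) = nums[l + c + 1] := idxL_eq_getElem nums _ hlt
    have hstep : bInner (nums.drop (l + c + 1)) (segMin nums l c) (segSum nums l c) r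
        = bInner (nums.drop (l + (c + 1) + 1)) (segMin nums l (c + 1)) (segSum nums l (c + 1))
            (max r (segVal nums l (c + 1))) := by
      rw [hdrop]
      simp only [bInner, segMin, segSum, segVal, hidx]
      have he : l + (c + 1) + 1 = l + c + 2 := by omega
      rw [he]
    rw [hstep]
    obtain ⟨ih1, ih2, ih3⟩ := ih (c + 1) l (max r (segVal nums l (c + 1))) (by omega) (by omega)
    refine ⟨le_trans (le_max_left _ _) ih1, ?_, ?_⟩
    · intro c' hc' hlen'
      rcases Nat.lt_or_ge c' (c + 2) with h' | h'
      · have : c' = c + 1 := by omega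
        subst this
        exact le_trans (le_max_right _ _) ih1
      · exact ih2 c' (by omega) hlen'
    · rcases ih3 with h | ⟨c', h1, h2, h3⟩
      · rw [h]
        rcases max_choice r (segVal nums l (c + 1)) with h' | h'
        · exact Or.inl h'
        · exact Or.inr ⟨c + 1, by omega, by omega, h'⟩
      · exact Or.inr ⟨c', by omega, h2, h3⟩

lemma bOuter_props (nums : List Int) :
    ∀ d l r, nums.length - l = d →
      (r ≤ bOuter (nums.drop l) r) ∧
      (∀ l' c, l ≤ l' → l' + c < nums.length → segVal nums l' c ≤ bOuter (nums.drop l) r) ∧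
      (bOuter (nums.drop l) r = r ∨
        ∃ l' c, l ≤ l' ∧ l' + c < nums.length ∧ bOuter (nums.drop l) r = segVal nums l' c) := by
  intro d
  induction d with
  | zero =>
    intro l r hd
    have hnil : nums.drop l = [] := List.drop_eq_nil_of_le (by omega)
    rw [hnil]
    exact ⟨le_refl _, fun l' c h1 h2 => by omega, Or.inl rfl⟩
  | succ d ih =>
    intro l r hd
    have hlt : l < nums.length := by omega
    have hdrop : nums.drop l = nums[l] :: nums.drop (l + 1) := List.drop_eq_getElem_cons hlt
    have hidx : idxL nums l = nums[l] := idxL_eq_getElem nums _ hlt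
    have hstep : bOuter (nums.drop l) r
        = bOuter (nums.drop (l + 1))
            (bInner (nums.drop (l + 0 + 1)) (segMin nums l 0) (segSum nums l 0)
              (max r (segVal nums l 0))) := by
      conv_lhs => rw [hdrop]
      simp only [bOuter, bInner]
      simp [segMin, segSum, segVal, hidx, min_self]
    rw [hstep]
    have hd2 : nums.length - (l + 1) = d := by omega
    set mid := bInner (nums.drop (l + 0 + 1)) (segMin nums l 0) (segSum nums l 0)
      (max r (segVal nums l 0)) with hmid
    obtain ⟨im1, im2, im3⟩ := bInner_props nums (nums.length - (l + 0 + 1)) 0 l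
      (max r (segVal nums l 0)) rfl (by omega)
    obtain ⟨io1, io2, io3⟩ := ih (l + 1) mid hd2
    have hrmid : r ≤ mid := le_trans (le_max_left _ _) im1
    refine ⟨le_trans hrmid io1, ?_, ?_⟩
    · intro l' c h1 h2
      rcases Nat.lt_or_ge l' (l + 1) with h' | h'
      · have : l' = l := by omega
        subst this
        rcases Nat.eq_zero_or_pos c with rfl | hc
        · exact le_trans (le_trans (le_max_right _ _) im1) io1
        · exact le_trans (im2 c (by omega) h2) io1
      · exact io2 l' c h' h2
    · rcases io3 with h | ⟨l', c, h1, h2, h3⟩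
      · rw [h, hmid]
        rcases im3 with h' | ⟨c', h1', h2', h3'⟩
        · rw [h']
          rcases max_choice r (segVal nums l 0) with h'' | h''
          · exact Or.inl h''
          · exact Or.inr ⟨l, 0, le_refl _, by omega, h''⟩
        · exact Or.inr ⟨l, c', le_refl _, h2', h3'⟩
      · exact Or.inr ⟨l', c, by omega, h2, h3⟩

lemma mx (a : Int) : a ≤ max a 0 ∧ 0 ≤ max a 0 ∧ (max a 0 = a ∨ max a 0 = 0) :=
  ⟨le_max_left _ _, le_max_right _ _, max_choice _ _⟩

-- left end of the window recorded when an element is popped above `rest`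
def lwOf (rest : List Nat) : Nat :=
  match rest.head? with
  | none => 0
  | some t => t + 1

lemma lwOf_nil : lwOf [] = 0 := rfl

lemma lwOf_cons (t : Nat) (r : List Nat) : lwOf (t :: r) = t + 1 := rfl

-- ----- the while-loop of A: everything the step proof needs about aPop -----

lemma aPop_props (ns total : List Int) (v' : Int) (i : Nat)
    (hv : 0 ≤ v')
    (hi : i < ns.length)
    (htval : ∀ k, total.getD k 0 = if k ≤ i then pfx ns (k + 1) else 0) :
    ∀ stack res,
      (∀ j ∈ stack, j < i) →
      stack.IsChain (PairP ns) →
      (∀ (h : stack ≠ []) (k : Nat), k < stack.getLast h →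
        max (idxL ns (stack.getLast h)) 0 < idxL ns k) →
      (∀ c ∈ stack, ∀ k, c < k → k < i → idxL ns c ≤ max (idxL ns k) 0) →
      (∀ k, k < i → (∀ t ∈ stack.head?, t < k) → v' < idxL ns k) →
      0 ≤ res →
      SoundRes ns (ns.length - 1) res →
      (∃ pp, stack = pp ++ (aPop ns total v' i stack res).1 ∧ ∀ j ∈ pp, v' < idxL ns j) ∧
      (∀ t ∈ (aPop ns total v' i stack res).1.head?, idxL ns t ≤ v') ∧
      res ≤ (aPop ns total v' i stack res).2 ∧
      0 ≤ (aPop ns total v' i stack res).2 ∧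
      SoundRes ns (ns.length - 1) (aPop ns total v' i stack res).2 ∧
      (∀ k, k < i → (∀ t ∈ (aPop ns total v' i stack res).1.head?, t < k) → v' < idxL ns k) ∧
      (∀ j ∈ stack, idxL ns j ≤ v' → j ∈ (aPop ns total v' i stack res).1) ∧
      (∀ pp j rest, stack = pp ++ j :: rest → v' < idxL ns j →
        (pfx ns i - pfx ns (lwOf rest)) * idxL ns j ≤ (aPop ns total v' i stack res).2) := by
  intro stack
  induction stack with
  | nil =>
    intro res _ _ _ _ hgap hnn hsound
    refine ⟨⟨[], rfl, by simp⟩, by simp [aPop], le_refl _, hnn, hsound, ?_, by simp, ?_⟩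
    · simpa [aPop] using hgap
    · intro pp j rest heq
      exact absurd heq (by simp)
  | cons j rest ih =>
    intro res hlt hch hbot haft hgap hnn hsound
    have hji : j < i := hlt j (by simp)
    have hipos : 0 < i := by omega
    by_cases hpop : v' < ns.getD j 0
    · -- pop j
      have hidxj : idxL ns j = ns.getD j 0 := rfl
      -- the recorded contribution
      have hpi : PySem.List.pyGetD total ((i : Int) - 1) 0 = pfx ns i := by
        have hcast : ((i : Int) - 1) = (((i - 1 : Nat)) : Int) := by omega
        rw [hcast, PySem.List.pyGetD_natCast]
        rw [htval (i - 1)]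
        have : i - 1 ≤ i := by omega
        simp only [if_pos this]
        congr 1
        omega
      have hstep : aPop ns total v' i (j :: rest) res
          = aPop ns total v' i rest
              (max res ((pfx ns i - pfx ns (lwOf rest)) * idxL ns j)) := by
        cases rest with
        | nil =>
          simp only [aPop, if_pos hpop, hpi]
          norm_num [lwOf, pfx, idxL]
        | cons t r' =>
          have hti : t < i := hlt t (by simp)
          simp only [aPop, if_pos hpop, hpi]
          rw [htval t, if_pos (by omega : t ≤ i)]
          simp [lwOf_cons, idxL]
      set C := (pfx ns i - pfx ns (lwOf rest)) * idxL ns j with hC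
      set res₁ := max res C with hres₁
      -- hypotheses for the recursive call
      have hlt' : ∀ x ∈ rest, x < i := fun x hx => hlt x (List.mem_cons_of_mem _ hx)
      have hch' : rest.IsChain (PairP ns) := (List.isChain_cons.mp hch).2
      have hbot' : ∀ (h : rest ≠ []) (k : Nat), k < rest.getLast h →
          max (idxL ns (rest.getLast h)) 0 < idxL ns k := by
        intro h k hk
        have h2 : (j :: rest) ≠ [] := by simp
        have hg : (j :: rest).getLast h2 = rest.getLast h := List.getLast_cons h
        have := hbot h2 k (by rw [hg]; exact hk)
        rwa [hg] at this
      have haft' : ∀ c ∈ rest, ∀ k, c < k → k < i → idxL ns c ≤ max (idxL ns k) 0 :=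
        fun c hc => haft c (List.mem_cons_of_mem _ hc)
      have hgap' : ∀ k, k < i → (∀ t ∈ rest.head?, t < k) → v' < idxL ns k := by
        intro k hk hcond
        rcases Nat.lt_trichotomy k j with h | h | h
        · -- k < j : k is below the popped top
          cases rest with
          | nil =>
            have h2 : (j :: ([] : List Nat)) ≠ [] := by simp
            have := hbot h2 k (by simpa using h)
            simp only [List.getLast] at this
            have hm := mx (idxL ns j)
            omega
          | cons t r' =>
            have ht : t < k := hcond t rfl
            have hp : PairP ns j t := List.rel_of_isChain_cons_cons hch
            have := hp.2.2 k ht h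
            have hm := mx (idxL ns j)
            omega
        · subst h; exact hpop
        · refine hgap k hk ?_
          intro t ht
          simp only [List.head?_cons, Option.mem_some_iff] at ht
          omega
      have hnn₁ : 0 ≤ res₁ := le_trans hnn (le_max_left _ _)
      have hlw_le : lwOf rest ≤ i := by
        cases rest with
        | nil => rw [lwOf_nil]; omega
        | cons t r' => have := hlt t (by simp); rw [lwOf_cons]; omega
      have hsound₁ : SoundRes ns (ns.length - 1) res₁ := by
        rcases le_or_gt C res with h | h
        · rw [hres₁, max_eq_left h]; exact hsound
        · rw [hres₁, max_eq_right (le_of_lt h)]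
          have hCpos : 0 < C := lt_of_le_of_lt hnn h
          have hjpos : 0 < idxL ns j := by
            by_contra hle
            push Not at hle
            have hd : 0 ≤ pfx ns i - pfx ns (lwOf rest) := by
              have := pfx_mono ns hlw_le; omega
            have : C ≤ 0 := mul_nonpos_of_nonneg_of_nonpos hd hle
            omega
          have hlwj : lwOf rest ≤ j := by
            cases rest with
            | nil => rw [lwOf_nil]; omega
            | cons t r' =>
              have hp : PairP ns j t := List.rel_of_isChain_cons_cons hch
              rw [lwOf_cons]
              have := hp.1
              omega
          have hmineq : segMin ns (lwOf rest) (i - 1 - lwOf rest) = idxL ns j := by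
            apply segMin_eq ns _ _ j hlwj (by omega)
            intro k hk1 hk2
            have hk2' : k ≤ i - 1 := by omega
            rcases Nat.lt_trichotomy k j with h' | h' | h'
            · cases rest with
              | nil =>
                have h2 : (j :: ([] : List Nat)) ≠ [] := by simp
                have := hbot h2 k (by simpa using h')
                simp only [List.getLast] at this
                have hm := mx (idxL ns j)
                omega
              | cons t r' =>
                have hp : PairP ns j t := List.rel_of_isChain_cons_cons hch
                have ht : t < k := by rw [lwOf_cons] at hk1; omega
                have := hp.2.2 k ht h'
                have hm := mx (idxL ns j)
                omega
            · subst h'; exact le_refl _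
            · have := haft j (by simp) k h' (by omega)
              have hm := mx (idxL ns k)
              omega
          have hsumeq : segSum ns (lwOf rest) (i - 1 - lwOf rest)
              = pfx ns i - pfx ns (lwOf rest) := by
            rw [segSum_eq_pfx]
            congr 2
            omega
          refine Or.inr ⟨lwOf rest, i - 1 - lwOf rest, by omega, ?_⟩
          rw [segVal, hmineq, hsumeq, hC, mul_comm]
      obtain ⟨⟨pp', hpp'1, hpp'2⟩, ch, cm, cn, cs, cg, ck, cc⟩ :=
        ih res₁ hlt' hch' hbot' haft' hgap' hnn₁ hsound₁
      rw [hstep]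
      refine ⟨⟨j :: pp', by rw [List.cons_append, ← hpp'1], ?_⟩, ch, ?_, cn, cs, cg, ?_, ?_⟩
      · intro x hx
        rcases List.mem_cons.mp hx with rfl | hx
        · exact hpop
        · exact hpp'2 x hx
      · exact le_trans (le_max_left _ _) cm
      · intro x hx hxv
        rcases List.mem_cons.mp hx with rfl | hx
        · exact absurd hpop (by rw [hidxj] at hxv; omega)
        · exact ck x hx hxv
      · intro pp j₀ rest₀ heq hj₀
        cases pp with
        | nil =>
          simp only [List.nil_append, List.cons.injEq] at heq
          obtain ⟨rfl, rfl⟩ := heq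
          exact le_trans (le_trans (le_max_right _ _) (le_refl _)) cm
        | cons p pp₂ =>
          simp only [List.cons_append, List.cons.injEq] at heq
          exact cc pp₂ j₀ rest₀ heq.2 hj₀
    · -- keep j : the loop stops
      have hstop : aPop ns total v' i (j :: rest) res = (j :: rest, res) := by
        simp only [aPop, if_neg hpop]
      rw [hstop]
      refine ⟨⟨[], rfl, by simp⟩, ?_, le_refl _, hnn, hsound, ?_, fun x hx _ => hx, ?_⟩
      · intro t ht
        simp only [List.head?_cons, Option.mem_some_iff] at ht
        subst ht
        exact le_of_not_gt hpop
      · intro k hk hcond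
        exact hgap k hk (by simpa using hcond)
      · intro pp j₀ rest₀ heq hj₀
        exfalso
        have hj₀mem : j₀ ∈ j :: rest := by rw [heq]; simp
        have := chain_le_top ns j rest hch j₀ hj₀mem
        have hm := mx (idxL ns j)
        have : idxL ns j ≤ v' := le_of_not_gt hpop
        omega

-- ----- one iteration of A's main loop preserves the invariant -----

lemma AInv_step (ns : List Int) (i : Nat) (stack : List Nat) (total : List Int) (res : Int)
    (v : Int) (hv : v = idxL ns i) (inv : AInv ns i stack total res) (hi : i < ns.length) :
    AInv ns (i + 1)
      (i :: (aPop ns (total.set i (PySem.List.pyGetD total ((i : Int) - 1) 0 + (if 0 ≤ v then v else 0)))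
              (if 0 ≤ v then v else 0) i stack res).1)
      (total.set i (PySem.List.pyGetD total ((i : Int) - 1) 0 + (if 0 ≤ v then v else 0)))
      (aPop ns (total.set i (PySem.List.pyGetD total ((i : Int) - 1) 0 + (if 0 ≤ v then v else 0)))
              (if 0 ≤ v then v else 0) i stack res).2 := by
  subst hv
  rw [clamp_if]
  set v' := max (idxL ns i) 0 with hv'
  have hvmx := mx (idxL ns i)
  have htot_ne : total ≠ [] := by
    have := inv.tlen
    intro h
    rw [h] at this
    simp at this
    omega
  have hpgd : PySem.List.pyGetD total ((i : Int) - 1) 0 = pfx ns i := by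
    rcases Nat.eq_zero_or_pos i with rfl | hip
    · rw [show ((0 : Nat) : Int) - 1 = -1 by omega]
      rw [PySem.List.pyGetD_neg_one total 0 htot_ne]
      have hlpos : 0 < total.length := by rw [inv.tlen]; omega
      have hgl : total.getLast htot_ne = total.getD (total.length - 1) 0 := by
        rw [List.getLast_eq_getElem]
        rw [List.getD_eq_getElem?_getD, List.getElem?_eq_getElem (by omega)]
        rfl
      rw [hgl, inv.tval]
      simp [pfx]
    · rw [show ((i : Nat) : Int) - 1 = (((i - 1 : Nat)) : Int) by omega, PySem.List.pyGetD_natCast total (i-1) 0]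
      rw [inv.tval, if_pos (by omega : i - 1 < i)]
      congr 1
      omega
  set T := total.set i (PySem.List.pyGetD total ((i : Int) - 1) 0 + v') with hT
  have hTlen : T.length = ns.length := by rw [hT, List.length_set, inv.tlen]
  have htval' : ∀ k, T.getD k 0 = if k ≤ i then pfx ns (k + 1) else 0 := by
    intro k
    rw [hT, hpgd]
    rcases eq_or_ne k i with rfl | hne
    · rw [List.getD_eq_getElem?_getD, List.getElem?_set_self (by rw [inv.tlen]; omega)]
      simp only [Option.getD_some, if_pos (le_refl k)]
      simp [pfx, hv']
    · rw [List.getD_eq_getElem?_getD, List.getElem?_set_ne (by omega)]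
      rw [← List.getD_eq_getElem?_getD, inv.tval]
      have : k < i ↔ k ≤ i := by omega
      simp [this]
  have hgap0 : ∀ k, k < i → (∀ t ∈ stack.head?, t < k) → v' < idxL ns k := by
    intro k hk hcond
    rcases inv.shape with ⟨rfl, rfl⟩ | ⟨tl, rfl, hip⟩
    · omega
    · have := hcond (i - 1) rfl
      omega
  obtain ⟨⟨pp, hpp, hppv⟩, ch, cm, cn, cs, cg, ck, cc⟩ :=
    aPop_props ns T v' i (by omega) hi htval' stack res inv.lt inv.chain inv.bot inv.after
      hgap0 inv.rnn inv.rsound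
  set st' := (aPop ns T v' i stack res).1 with hst'
  set r' := (aPop ns T v' i stack res).2 with hr'
  have hsub : ∀ x ∈ st', x ∈ stack := by
    intro x hx
    rw [hpp]
    exact List.mem_append_right _ hx
  have hst'chain : st'.IsChain (PairP ns) := by
    have := inv.chain
    rw [hpp] at this
    exact (List.isChain_append.mp this).2.1
  have hallle : ∀ x ∈ st', idxL ns x ≤ v' := by
    intro x hx
    cases hcase : st' with
    | nil => rw [hcase] at hx; simp at hx
    | cons t tl =>
      rw [hcase] at hx
      have hch2 : (t :: tl).IsChain (PairP ns) := hcase ▸ hst'chain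
      have hhead : idxL ns t ≤ v' := ch t (by rw [hcase]; rfl)
      have := chain_le_top ns t tl hch2 x hx
      have hm := mx (idxL ns t)
      omega
  constructor
  · -- lt
    intro x hx
    rcases List.mem_cons.mp hx with rfl | hx
    · omega
    · have := inv.lt x (hsub x hx); omega
  · -- chain
    cases hcase : st' with
    | nil => simp
    | cons t tl =>
      rw [List.isChain_cons_cons]
      constructor
      · refine ⟨?_, ?_, ?_⟩
        · have := inv.lt t (hsub t (by rw [hcase]; simp))
          omega
        · have := ch t (by rw [hcase]; rfl)
          omega
        · intro k hk1 hk2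
          exact cg k hk2 (by intro t' ht'; rw [hcase] at ht'; simp at ht'; omega)
      · rw [← hcase]; exact hst'chain
  · -- bot
    intro h k hk
    by_cases hs : st' = []
    · have hgl : (i :: st').getLast h = i := by simp [hs]
      rw [hgl] at hk ⊢
      exact cg k hk (by rw [hs]; simp)
    · have hne2 : stack ≠ [] := by
        rw [hpp]
        intro hc
        exact hs (List.append_eq_nil_iff.mp hc).2
      have hgl : (i :: st').getLast h = st'.getLast hs := List.getLast_cons hs
      have hgl2 : st'.getLast hs = stack.getLast hne2 := by
        have e1 : stack.getLast? = st'.getLast? := by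
          rw [hpp, List.getLast?_append_of_ne_nil _ hs]
        rw [List.getLast?_eq_some_getLast hne2, List.getLast?_eq_some_getLast hs] at e1
        exact (Option.some.injEq _ _ ▸ e1).symm
      rw [hgl, hgl2] at hk ⊢
      exact inv.bot hne2 k hk
  · -- shape
    exact Or.inr ⟨st', by simp, by omega⟩
  · -- mem
    intro j hj hjpos hjcond
    rcases eq_or_ne j i with rfl | hne
    · exact List.mem_cons_self
    · have hji : j < i := by omega
      have hvj : idxL ns j ≤ v' := by
        have := hjcond i (by omega) (by omega)
        omega
      have hjstack : j ∈ stack :=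
        inv.mem j hji hjpos (fun k hk1 hk2 => hjcond k hk1 (by omega))
      exact List.mem_cons_of_mem _ (ck j hjstack hvj)
  · -- after
    intro c hc k hk1 hk2
    rcases List.mem_cons.mp hc with rfl | hc
    · omega
    · rcases eq_or_ne k i with rfl | hne
      · exact hallle c hc
      · exact inv.after c (hsub c hc) k hk1 (by omega)
  · -- tlen
    exact hTlen
  · -- ile
    omega
  · -- tval
    intro k
    rw [htval' k]
    have : k < i + 1 ↔ k ≤ i := by omega
    simp [this]
  · -- rnn
    exact cn
  · -- rsound
    exact cs
  · -- rcomp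
    intro l c hlc hm hex
    by_cases hex' : ∃ k, l + c < k ∧ k < i ∧ idxL ns k < segMin ns l c
    · obtain ⟨k, hk1, hk2, hk3⟩ := hex'
      have := inv.rcomp l c (by omega) hm ⟨k, hk1, hk2, hk3⟩
      omega
    · push Not at hex'
      obtain ⟨k, hk1, hk2, hk3⟩ := hex
      have hki : k = i := by
        rcases eq_or_ne k i with rfl | hne
        · rfl
        · exact absurd hk3 (by have := hex' k hk1 (by omega); omega)
      subst hki
      have hlci : l + c < k := hk1
      have hnok : ∀ k', l + c < k' → k' < k → segMin ns l c ≤ idxL ns k' := hex'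
      obtain ⟨j, hj1, hj2, hj3, hj4⟩ := segMin_argfirst ns l c
      have hjk : j < k := by omega
      have hjpos : 0 < idxL ns j := by omega
      have hjstack : j ∈ stack := by
        apply inv.mem j hjk hjpos
        intro k' hk'1 hk'2
        have hm' := mx (idxL ns k')
        rcases Nat.lt_or_ge (l + c) k' with h' | h'
        · have := hnok k' h' hk'2
          omega
        · have := segMin_le ns l c k' (by omega) h'
          omega
      obtain ⟨pp₀, rest₀, hdec⟩ := List.append_of_mem hjstack
      have hvj : v' < idxL ns j := by
        rw [hv']
        omega
      have hcontrib := cc pp₀ j rest₀ hdec hvj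
      have hlw : lwOf rest₀ ≤ l := by
        cases rest₀ with
        | nil => rw [lwOf_nil]; omega
        | cons t r'' =>
          rw [lwOf_cons]
          have hchjt : PairP ns j t := by
            have := inv.chain
            rw [hdec] at this
            exact List.rel_of_isChain_cons_cons (List.isChain_append.mp this).2.1
          have htj : t < j := hchjt.1
          have htle : idxL ns t ≤ max (idxL ns j) 0 := hchjt.2.1
          by_contra hcon
          push Not at hcon
          have := hj4 t (by omega) htj
          have hmj := mx (idxL ns j)
          omega
      have hseg : segSum ns l c ≤ pfx ns k - pfx ns (lwOf rest₀) := by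
        rw [segSum_eq_pfx]
        have h1 := pfx_mono ns hlw
        have h2 := pfx_mono ns (by omega : l + c + 1 ≤ k)
        omega
      have : segVal ns l c ≤ (pfx ns k - pfx ns (lwOf rest₀)) * idxL ns j := by
        rw [segVal, ← hj3, mul_comm]
        exact mul_le_mul_of_nonneg_right hseg (by omega)
      omega

-- ----- running A's main loop from a valid state -----

lemma aMain_run (ns : List Int) :
    ∀ rem i stack total res, rem = ns.drop i → AInv ns i stack total res →
      0 ≤ aMain ns rem i stack total res ∧
      SoundRes ns (ns.length - 1) (aMain ns rem i stack total res) ∧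
      (∀ l c, l + c < ns.length → 0 < segMin ns l c →
        (∃ k, l + c < k ∧ k < ns.length ∧ idxL ns k < segMin ns l c) →
        segVal ns l c ≤ aMain ns rem i stack total res) := by
  intro rem
  induction rem with
  | nil =>
    intro i stack total res hrem inv
    have hlen : ns.length ≤ i := by
      have := congrArg List.length hrem
      simp at this
      omega
    have hieq : i = ns.length := by have := inv.ile; omega
    subst hieq
    exact ⟨inv.rnn, inv.rsound, fun l c h1 h2 h3 => inv.rcomp l c h1 h2 h3⟩
  | cons v rem' ih =>
    intro i stack total res hrem inv
    have hi : i < ns.length := by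
      by_contra hcon
      push Not at hcon
      rw [List.drop_eq_nil_of_le hcon] at hrem
      exact absurd hrem (by simp)
    have hdrop : ns.drop i = ns[i] :: ns.drop (i + 1) := List.drop_eq_getElem_cons hi
    rw [hdrop] at hrem
    have hveq : v = idxL ns i := by
      rw [idxL_eq_getElem ns i hi]
      exact (List.cons.injEq _ _ _ _ ▸ hrem).1
    have hrem' : rem' = ns.drop (i + 1) := (List.cons.injEq _ _ _ _ ▸ hrem).2
    have hstep := AInv_step ns i stack total res v hveq inv hi
    simp only [aMain]
    exact ih (i + 1) _ _ _ hrem' hstep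

-- ===== VERDICT (by name: the statement is the Claim_ definition above) =====
theorem max_area_min_sum_product_spec : Claim_equal_max_area_min_sum_product := by
  intro nums _
  show max_area_min_sum_product nums = max_area_min_sum_product_alt nums
  by_cases hnil : nums = []
  · subst hnil
    rfl
  · have hA : max_area_min_sum_product nums
        = aMain (nums ++ [-1]) (nums ++ [-1]) 0 []
            (List.replicate (nums ++ [-1]).length 0) 0 := by
      simp [max_area_min_sum_product, List.isEmpty_iff, hnil]
    set ns := nums ++ [-1] with hns
    have hlen : ns.length = nums.length + 1 := by simp [hns]
    have inv0 : AInv ns 0 [] (List.replicate ns.length 0) 0 := by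
      refine ⟨?_, ?_, ?_, ?_, ?_, ?_, ?_, ?_, ?_, ?_, ?_, ?_⟩
      · intro j hj; simp at hj
      · simp
      · intro h; simp at h
      · exact Or.inl ⟨rfl, rfl⟩
      · intro j hj; omega
      · intro c hc; simp at hc
      · simp
      · omega
      · intro k
        rw [List.getD_eq_getElem?_getD, List.getElem?_replicate]
        split <;> simp
      · exact le_refl 0
      · exact Or.inl rfl
      · intro l c h; omega
    obtain ⟨Ann, Asound, Acomp⟩ :=
      aMain_run ns ns 0 [] (List.replicate ns.length 0) 0 (by simp) inv0
    rw [hA]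
    have hBdef : max_area_min_sum_product_alt nums = bOuter (nums.drop 0) 0 := by
      simp [max_area_min_sum_product_alt]
    obtain ⟨Bnn, Bcov, Bsound⟩ := bOuter_props nums nums.length 0 0 (by simp)
    rw [hBdef]
    have hABle : aMain ns ns 0 [] (List.replicate ns.length 0) 0 ≤ bOuter (nums.drop 0) 0 := by
      rcases Asound with h | ⟨l, c, hb, he⟩
      · rw [h]; exact Bnn
      · rw [he, hns, segVal_append nums l c (by omega)]
        exact Bcov l c (Nat.zero_le _) (by omega)
    have hBAle : bOuter (nums.drop 0) 0 ≤ aMain ns ns 0 [] (List.replicate ns.length 0) 0 := by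
      rcases Bsound with h | ⟨l, c, h0, hb, he⟩
      · rw [h]; exact Ann
      · rw [he]
        rcases le_or_gt (segMin nums l c) 0 with hm | hm
        · have hs := segSum_nonneg nums l c
          have hle : segVal nums l c ≤ 0 := mul_nonpos_iff.mpr (Or.inr ⟨hm, hs⟩)
          omega
        · have h1 : l + c < ns.length := by omega
          have h2 : 0 < segMin ns l c := by rw [hns, segMin_append nums l c hb]; omega
          have h3 : idxL ns nums.length = -1 := idxL_sentinel nums
          have := Acomp l c h1 h2 ⟨nums.length, by omega, by omega, by rw [h3]; omega⟩
          rw [hns, segVal_append nums l c hb] at this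
          exact this
    exact le_antisymm hABle hBAle
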